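-- pv_equiv track=rewrite | github.com/sajadkhosravi/EE-Scheduling-of-Moldable-Streaming-Computations-for-the-ECC | src/optimizer/heuristic/strictHeuristic.py | get_child_core_groups
-- ===== SOURCE A (Python) =====
-- def get_child_core_groups(core_group, max_core_group_id):
--     core_groups = []
--     candidate = [core_group]
--     while len(candidate) > 0:
--         group_id = candidate.pop(0)
--         if group_id * 2 < max_core_group_id:
--             res = group_id * 2
--             core_groups.append(res)
--             core_groups.append(res + 1)
--             candidate.append(res)
--             candidate.append(res + 1)
--
--     return core_groups
-- ===== SOURCE B (Python) =====
-- def get_child_core_groups(core_group, max_core_group_id):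
--     out = []
--     s, e = core_group, core_group + 1
--     while True:
--         q = (max_core_group_id - 1) // 2   # largest p with 2*p < max_core_group_id
--         u = min(e, q + 1)
--         if u <= s:
--             return out
--         out.extend(range(2 * s, 2 * u))
--         s, e = 2 * s, 2 * u
-- ===== Notes on version B (the rewrite author's own statement) =====
-- stated objective: faster
-- what changed: Replaces the per-node FIFO queue BFS with level arithmetic: each BFS level is a contiguous integer range [s,e) since the child test p*2<max holds exactly for a prefix of the level, so B emits range(2s,2u) per level instead of popping nodes one by one.
import Mathlib
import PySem

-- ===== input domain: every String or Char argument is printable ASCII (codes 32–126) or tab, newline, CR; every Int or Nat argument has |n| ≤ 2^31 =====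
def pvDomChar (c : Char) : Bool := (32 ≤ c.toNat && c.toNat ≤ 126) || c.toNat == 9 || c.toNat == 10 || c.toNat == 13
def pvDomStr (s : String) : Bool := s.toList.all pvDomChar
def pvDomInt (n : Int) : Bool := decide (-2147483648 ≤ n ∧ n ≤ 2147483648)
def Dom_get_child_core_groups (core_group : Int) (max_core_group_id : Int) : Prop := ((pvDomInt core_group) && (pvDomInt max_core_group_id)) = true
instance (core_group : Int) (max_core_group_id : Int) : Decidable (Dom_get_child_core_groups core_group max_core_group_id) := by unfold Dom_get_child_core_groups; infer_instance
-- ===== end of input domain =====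

-- B replaces A's per-node FIFO BFS with per-level range arithmetic (each BFS level is a
-- contiguous integer range), emitting range(2*s, 2*u) per level; objective: faster (constant factor).

-- ===== PORT A =====
-- A's while-loop over the FIFO queue `candidate` (popped from the front, appended at the
-- back) and the growing `core_groups` list.  So that every Python O(1) append stays O(1)
-- here, the queue is the standard functional pair (front, reversed back) and the output is
-- accumulated reversed; pvALoopQ_eq_pvALoop below proves this equal to the direct
-- `++`-formulation pvALoop of the same loop.  The fuel bound only makes the recursion
-- total — within Pre_ the queue empties long before it runs out.
def pvALoopQ : Nat → List Int → List Int → List Int → Int → List Int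
  | 0, _, _, accR, _ => accR.reverse
  | fuel + 1, front, back, accR, max_core_group_id =>
    match front with
    | group_id :: rest =>
      if group_id * 2 < max_core_group_id then
        pvALoopQ fuel rest ((group_id * 2 + 1) :: (group_id * 2) :: back)
          ((group_id * 2 + 1) :: (group_id * 2) :: accR) max_core_group_id
      else
        pvALoopQ fuel rest back accR max_core_group_id
    | [] =>
      match back.reverse with
      | [] => accR.reverse
      | group_id :: rest =>
        if group_id * 2 < max_core_group_id then
          pvALoopQ fuel rest [(group_id * 2 + 1), (group_id * 2)]
            ((group_id * 2 + 1) :: (group_id * 2) :: accR) max_core_group_id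
        else
          pvALoopQ fuel rest [] accR max_core_group_id

def get_child_core_groups (core_group : Int) (max_core_group_id : Int) : List Int :=
  pvALoopQ (2 ^ 40) [core_group] [] [] max_core_group_id

-- ===== PORT B =====
-- B's while-loop over the current level [s, e); fuel only for totality (64 levels is ample
-- within Pre_, where s ≥ 1 doubles each round or the loop exits at once).
def pvBLoop : Nat → Int → Int → List Int → Int → List Int
  | 0, _, _, out, _ => out
  | fuel + 1, s, e, out, max_core_group_id =>
    let q := PySem.Int.floordiv (max_core_group_id - 1) 2
    let u := min e (q + 1)
    if u ≤ s then out
    else pvBLoop fuel (2 * s) (2 * u) (out ++ PySem.List.pyRange (2 * s) (2 * u)) max_core_group_id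

def get_child_core_groups_alt (core_group : Int) (max_core_group_id : Int) : List Int :=
  pvBLoop 64 core_group (core_group + 1) [] max_core_group_id

-- ===== PRECONDITION & SPEC =====
-- Pre_ excludes exactly the inputs (core_group ≤ 0 and core_group*2 < max_core_group_id)
-- on which Python A never returns (its BFS queue grows forever); Python B also loops there.
def Pre_get_child_core_groups (core_group : Int) (max_core_group_id : Int) : Prop :=
  1 ≤ core_group ∨ max_core_group_id ≤ 2 * core_group
instance (core_group : Int) (max_core_group_id : Int) : Decidable (Pre_get_child_core_groups core_group max_core_group_id) := by unfold Pre_get_child_core_groups; infer_instance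
def pvWitness_get_child_core_groups : Int × Int := (1, 9)

def Spec_get_child_core_groups (core_group : Int) (max_core_group_id : Int) (out : List Int) : Prop := out = get_child_core_groups_alt core_group max_core_group_id
instance (core_group : Int) (max_core_group_id : Int) (out : List Int) : Decidable (Spec_get_child_core_groups core_group max_core_group_id out) := by unfold Spec_get_child_core_groups; infer_instance

-- ===== CLAIM (what is proved, stated in full; the proofs are below) =====
def Claim_equal_get_child_core_groups : Prop := ∀ (core_group : Int) (max_core_group_id : Int), Dom_get_child_core_groups core_group max_core_group_id → Pre_get_child_core_groups core_group max_core_group_id → Spec_get_child_core_groups core_group max_core_group_id (get_child_core_groups core_group max_core_group_id)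

-- ===== LEMMAS AND PROOFS =====

-- proof-side reference formulation of A's loop, with direct list appends
def pvALoop : Nat → List Int → List Int → Int → List Int
  | 0, _, core_groups, _ => core_groups
  | fuel + 1, candidate, core_groups, max_core_group_id =>
    match candidate with
    | [] => core_groups
    | group_id :: rest =>
      if group_id * 2 < max_core_group_id then
        pvALoop fuel (rest ++ [group_id * 2, group_id * 2 + 1])
          (core_groups ++ [group_id * 2, group_id * 2 + 1]) max_core_group_id
      else
        pvALoop fuel rest core_groups max_core_group_id

theorem pvALoopQ_eq_pvALoop (m : Int) : ∀ (fuel : Nat) (front back accR : List Int),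
    pvALoopQ fuel front back accR m = pvALoop fuel (front ++ back.reverse) accR.reverse m := by
  intro fuel
  induction fuel with
  | zero => intro front back accR; rfl
  | succ fuel ih =>
    intro front back accR
    cases front with
    | cons g rest =>
      show (if g * 2 < m then pvALoopQ fuel rest ((g * 2 + 1) :: (g * 2) :: back)
              ((g * 2 + 1) :: (g * 2) :: accR) m
            else pvALoopQ fuel rest back accR m) = _
      by_cases hg : g * 2 < m
      · rw [if_pos hg, ih]
        show _ = (if g * 2 < m then pvALoop fuel ((rest ++ back.reverse) ++ [g * 2, g * 2 + 1])
            (accR.reverse ++ [g * 2, g * 2 + 1]) m else _)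
        rw [if_pos hg]
        simp
      · rw [if_neg hg, ih]
        show _ = (if g * 2 < m then _
            else pvALoop fuel (rest ++ back.reverse) accR.reverse m)
        rw [if_neg hg]
    | nil =>
      show (match back.reverse with
            | [] => accR.reverse
            | group_id :: rest =>
              if group_id * 2 < m then
                pvALoopQ fuel rest [(group_id * 2 + 1), (group_id * 2)]
                  ((group_id * 2 + 1) :: (group_id * 2) :: accR) m
              else pvALoopQ fuel rest [] accR m) = _
      cases hb : back.reverse with
      | nil => simp [pvALoop]
      | cons g rest =>
        simp only [List.nil_append]
        show _ = pvALoop (fuel + 1) (g :: rest) accR.reverse m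
        by_cases hg : g * 2 < m
        · rw [if_pos hg, ih]
          show _ = (if g * 2 < m then pvALoop fuel (rest ++ [g * 2, g * 2 + 1])
              (accR.reverse ++ [g * 2, g * 2 + 1]) m else _)
          rw [if_pos hg]
          simp
        · rw [if_neg hg, ih]
          show _ = (if g * 2 < m then _ else pvALoop fuel rest accR.reverse m)
          rw [if_neg hg]
          simp

-- abbreviation for the child threshold: 2*g < m ↔ g ≤ pvQ m
def pvQ (m : Int) : Int := PySem.Int.floordiv (m - 1) 2

theorem pvQ_bounds (m : Int) : 2 * pvQ m < m ∧ m ≤ 2 * pvQ m + 2 := by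
  unfold pvQ
  rw [PySem.Int.floordiv_eq_ediv_of_pos (by norm_num)]
  omega

theorem pvALoop_nil (fa : Nat) (acc : List Int) (m : Int) : pvALoop fa [] acc m = acc := by
  cases fa <;> rfl

-- processing a run of parents that all pass the test appends the doubled range
theorem pvALoop_pass (m : Int) : ∀ (n : Nat) (i : Int) (K acc : List Int) (fa : Nat),
    i + n ≤ pvQ m + 1 →
    pvALoop (n + fa) (PySem.List.pyRange i (i + n) ++ K) acc m
      = pvALoop fa (K ++ PySem.List.pyRange (2 * i) (2 * (i + n)))
          (acc ++ PySem.List.pyRange (2 * i) (2 * (i + n))) m := by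
  intro n
  induction n with
  | zero =>
    intro i K acc fa _
    simp
  | succ n ih =>
    intro i K acc fa h
    have hq := pvQ_bounds m
    have hiq : i ≤ pvQ m := by push_cast at h ⊢; omega
    have hcons : PySem.List.pyRange i (i + (n + 1 : Nat)) = i :: PySem.List.pyRange (i + 1) (i + (n + 1 : Nat)) :=
      PySem.List.pyRange_one_cons (by push_cast; omega)
    rw [hcons]
    show pvALoop (n + 1 + fa) (i :: (PySem.List.pyRange (i + 1) (i + (n + 1 : Nat)) ++ K)) acc m = _
    have hstep : (n + 1 + fa) = (n + fa) + 1 := by omega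
    rw [hstep]
    show (if i * 2 < m then
        pvALoop (n + fa) ((PySem.List.pyRange (i + 1) (i + (n + 1 : Nat)) ++ K) ++ [i * 2, i * 2 + 1])
          (acc ++ [i * 2, i * 2 + 1]) m
      else pvALoop (n + fa) (PySem.List.pyRange (i + 1) (i + (n + 1 : Nat)) ++ K) acc m) = _
    rw [if_pos (by omega)]
    have he1 : i + ((n : Int) + 1) = (i + 1) + (n : Nat) := by ring
    push_cast
    rw [he1, List.append_assoc]
    rw [ih (i + 1) (K ++ [i * 2, i * 2 + 1]) (acc ++ [i * 2, i * 2 + 1]) fa (by push_cast at h ⊢; omega)]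
    have hsplit : PySem.List.pyRange (2 * i) (2 * (i + 1 + (n : Nat))) =
        [i * 2, i * 2 + 1] ++ PySem.List.pyRange (2 * (i + 1)) (2 * (i + 1 + (n : Nat))) := by
      rw [PySem.List.pyRange_one_cons (by omega),
          PySem.List.pyRange_one_cons (by omega)]
      rw [show (2 * i + 1 + 1 : Int) = 2 * (i + 1) from by ring]
      simp only [List.cons_append, List.nil_append, List.cons.injEq]
      exact ⟨by ring, by ring, trivial⟩
    rw [hsplit]
    simp [List.append_assoc]

-- processing a run of parents that all fail the test just consumes them
theorem pvALoop_fail (m : Int) : ∀ (n : Nat) (i : Int) (K acc : List Int) (fa : Nat),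
    (pvQ m + 1 ≤ i ∨ n = 0) →
    pvALoop (n + fa) (PySem.List.pyRange i (i + n) ++ K) acc m = pvALoop fa K acc m := by
  intro n
  induction n with
  | zero =>
    intro i K acc fa _
    simp
  | succ n ih =>
    intro i K acc fa h
    have hq := pvQ_bounds m
    have hiq : pvQ m + 1 ≤ i := by
      rcases h with h | h
      · exact h
      · omega
    have hcons : PySem.List.pyRange i (i + (n + 1 : Nat)) = i :: PySem.List.pyRange (i + 1) (i + (n + 1 : Nat)) :=
      PySem.List.pyRange_one_cons (by push_cast; omega)
    rw [hcons]
    have hstep : (n + 1 + fa) = (n + fa) + 1 := by omega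
    rw [hstep]
    show (if i * 2 < m then
        pvALoop (n + fa) ((PySem.List.pyRange (i + 1) (i + (n + 1 : Nat)) ++ K) ++ [i * 2, i * 2 + 1])
          (acc ++ [i * 2, i * 2 + 1]) m
      else pvALoop (n + fa) (PySem.List.pyRange (i + 1) (i + (n + 1 : Nat)) ++ K) acc m) = _
    rw [if_neg (by omega)]
    have he1 : i + ((n : Int) + 1) = (i + 1) + (n : Nat) := by ring
    push_cast
    rw [he1]
    exact ih (i + 1) K acc fa (Or.inl (by omega))

theorem pvBLoop_succ (fb : Nat) (s e : Int) (acc : List Int) (m : Int) :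
    pvBLoop (fb + 1) s e acc m =
      if min e (pvQ m + 1) ≤ s then acc
      else pvBLoop fb (2 * s) (2 * min e (pvQ m + 1))
        (acc ++ PySem.List.pyRange (2 * s) (2 * min e (pvQ m + 1))) m := rfl

theorem pvBLoop_mono (m : Int) : ∀ (fb : Nat) (j : Nat) (s e : Int) (acc : List Int),
    pvQ m + 1 ≤ s * 2 ^ fb →
    pvBLoop (fb + 1 + j) s e acc m = pvBLoop (fb + 1) s e acc m := by
  intro fb
  induction fb with
  | zero =>
    intro j s e acc h
    rw [show (0 + 1 + j) = j + 1 from by omega, pvBLoop_succ, pvBLoop_succ]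
    rw [if_pos (by simp at h ⊢; omega), if_pos (by simp at h ⊢; omega)]
  | succ fb ih =>
    intro j s e acc h
    rw [show (fb + 1 + 1 + j) = (fb + 1 + j) + 1 from by omega, pvBLoop_succ, pvBLoop_succ]
    by_cases hu : min e (pvQ m + 1) ≤ s
    · rw [if_pos hu, if_pos hu]
    · rw [if_neg hu, if_neg hu]
      exact ih j (2 * s) (2 * min e (pvQ m + 1)) _
          (by
            have he : s * 2 ^ (fb + 1) = 2 * s * 2 ^ fb := by ring
            omega)

-- the BFS level simulation: A's queue, when it is the range [s, e), evolves level by level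
-- exactly as B's bounds do, and enough fuel is bounded by (e - s) * (2^(fb+1) - 1)
theorem pvMain (m : Int) : ∀ (fb : Nat) (s e : Int) (acc : List Int),
    s ≤ e → pvQ m + 1 ≤ s * 2 ^ fb →
    ∃ k : Nat, k ≤ (e - s).toNat * (2 ^ (fb + 1) - 1) ∧
      ∀ fa, pvALoop (k + fa) (PySem.List.pyRange s e) acc m = pvBLoop (fb + 1) s e acc m := by
  intro fb
  induction fb with
  | zero =>
    intro s e acc hse h
    simp only [pow_zero, mul_one] at h
    refine ⟨(e - s).toNat, by norm_num, fun fa => ?_⟩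
    rw [pvBLoop_succ, if_pos (by omega)]
    have he : e = s + ((e - s).toNat : Int) := by omega
    rw [congrArg (PySem.List.pyRange s) he]
    have hfail := pvALoop_fail m (e - s).toNat s [] acc fa (Or.inl h)
    simpa [pvALoop_nil] using hfail
  | succ fb ih =>
    intro s e acc hse h
    by_cases hu : min e (pvQ m + 1) ≤ s
    · -- the level emits nothing: all parents fail (or the level is empty)
      refine ⟨(e - s).toNat, ?_, fun fa => ?_⟩
      · refine Nat.le_mul_of_pos_right _ ?_
        have h2 : 2 ^ (fb + 1 + 1) = 2 * 2 ^ (fb + 1) := by ring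
        have h1 : 1 ≤ 2 ^ (fb + 1) := Nat.one_le_two_pow
        omega
      · rw [pvBLoop_succ, if_pos hu]
        have he : e = s + ((e - s).toNat : Int) := by omega
        rw [congrArg (PySem.List.pyRange s) he]
        have hcase : pvQ m + 1 ≤ s ∨ (e - s).toNat = 0 := by omega
        have hfail := pvALoop_fail m (e - s).toNat s [] acc fa hcase
        simpa [pvALoop_nil] using hfail
    · -- the level emits range(2s, 2u) and recurses on it
      set u := min e (pvQ m + 1) with hu_def
      have hsu : s < u := by omega
      have hue : u ≤ e := by omega
      have huq : u ≤ pvQ m + 1 := by omega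
      have hrec : pvQ m + 1 ≤ (2 * s) * 2 ^ fb := by
        have he : s * 2 ^ (fb + 1) = 2 * s * 2 ^ fb := by ring
        omega
      obtain ⟨k', hk'b, hk'⟩ := ih (2 * s) (2 * u) (acc ++ PySem.List.pyRange (2 * s) (2 * u)) (by omega) hrec
      refine ⟨(u - s).toNat + ((e - u).toNat + k'), ?_, fun fa => ?_⟩
      · have h3 : (2 * u - 2 * s).toNat = 2 * (u - s).toNat := by omega
        rw [h3] at hk'b
        obtain ⟨Q, hQ⟩ : ∃ Q, 2 ^ (fb + 1) = Q + 1 :=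
          ⟨2 ^ (fb + 1) - 1, by have := Nat.one_le_two_pow (n := fb + 1); omega⟩
        have h2 : 2 ^ (fb + 1 + 1) = 2 * (Q + 1) := by rw [pow_succ, hQ]; ring
        rw [hQ] at hk'b
        rw [h2]
        have h5 : (u - s).toNat + (e - u).toNat = (e - s).toNat := by omega
        rw [← h5]
        have hk2 : k' ≤ 2 * ((u - s).toNat * Q) := by
          have : 2 * (u - s).toNat * (Q + 1 - 1) = 2 * ((u - s).toNat * Q) := by
            rw [Nat.add_sub_cancel]; ring
          omega
        have hexp : ((u - s).toNat + (e - u).toNat) * (2 * (Q + 1) - 1)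
            = (u - s).toNat + (e - u).toNat + 2 * ((u - s).toNat * Q) + 2 * ((e - u).toNat * Q) := by
          have h6 : 2 * (Q + 1) - 1 = 2 * Q + 1 := by omega
          rw [h6]; ring
        omega
      · rw [pvBLoop_succ, if_neg (by omega)]
        rw [PySem.List.pyRange_one_append s u e (by omega) hue]
        have hsplit1 : (u : Int) = s + ((u - s).toNat : Int) := by omega
        have hsplit2 : (e : Int) = u + ((e - u).toNat : Int) := by omega
        calc pvALoop ((u - s).toNat + ((e - u).toNat + k') + fa)
                (PySem.List.pyRange s u ++ PySem.List.pyRange u e) acc m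
            = pvALoop ((u - s).toNat + (((e - u).toNat + (k' + fa))))
                (PySem.List.pyRange s (s + ((u - s).toNat : Int)) ++ PySem.List.pyRange u e) acc m := by
                rw [← hsplit1]; congr 1; omega
          _ = pvALoop ((e - u).toNat + (k' + fa))
                (PySem.List.pyRange u e ++ PySem.List.pyRange (2 * s) (2 * (s + ((u - s).toNat : Int))))
                (acc ++ PySem.List.pyRange (2 * s) (2 * (s + ((u - s).toNat : Int)))) m := by
                exact pvALoop_pass m (u - s).toNat s _ acc _ (by omega)
          _ = pvALoop ((e - u).toNat + (k' + fa))
                (PySem.List.pyRange u (u + ((e - u).toNat : Int)) ++ PySem.List.pyRange (2 * s) (2 * u))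
                (acc ++ PySem.List.pyRange (2 * s) (2 * u)) m := by
                rw [← hsplit1, ← hsplit2]
          _ = pvALoop (k' + fa) (PySem.List.pyRange (2 * s) (2 * u))
                (acc ++ PySem.List.pyRange (2 * s) (2 * u)) m := by
                by_cases h0 : (e - u).toNat = 0
                · rw [h0]
                  exact pvALoop_fail m 0 u _ _ _ (Or.inr rfl)
                · exact pvALoop_fail m (e - u).toNat u _ _ _ (Or.inl (by omega))
          _ = pvBLoop (fb + 1) (2 * s) (2 * u) (acc ++ PySem.List.pyRange (2 * s) (2 * u)) m :=
                hk' fa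

-- ===== VERDICT (by name: the statement is the Claim_ definition above) =====
theorem get_child_core_groups_spec : Claim_equal_get_child_core_groups := by
  intro c m hdom hpre
  unfold Spec_get_child_core_groups get_child_core_groups get_child_core_groups_alt
  rw [pvALoopQ_eq_pvALoop]
  simp only [List.reverse_nil, List.append_nil]
  simp only [Dom_get_child_core_groups, pvDomInt, Bool.and_eq_true, decide_eq_true_eq] at hdom
  have hq := pvQ_bounds m
  obtain ⟨fb, hfb31, hfb⟩ : ∃ fb : Nat, fb ≤ 31 ∧ pvQ m + 1 ≤ c * 2 ^ fb := by
    rcases hpre with h | h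
    · exact ⟨31, le_refl _, by norm_num; omega⟩
    · exact ⟨0, by omega, by norm_num; omega⟩
  obtain ⟨k, hkb, hk⟩ := pvMain m fb c (c + 1) [] (by omega) hfb
  have hkle : k ≤ 2 ^ 40 := by
    have h1 : (c + 1 - c).toNat = 1 := by omega
    rw [h1, one_mul] at hkb
    have h2 : 2 ^ (fb + 1) ≤ 2 ^ 32 := Nat.pow_le_pow_right (by norm_num) (by omega)
    omega
  have hc1 : PySem.List.pyRange c (c + 1) = [c] := by
    rw [PySem.List.pyRange_one_cons (by omega)]
    simp
  calc pvALoop (2 ^ 40) [c] [] m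
      = pvALoop (k + (2 ^ 40 - k)) (PySem.List.pyRange c (c + 1)) [] m := by
        rw [hc1]; congr 1; omega
    _ = pvBLoop (fb + 1) c (c + 1) [] m := hk _
    _ = pvBLoop 64 c (c + 1) [] m := by
        rw [show (64 : Nat) = fb + 1 + (63 - fb) from by omega]
        exact (pvBLoop_mono m fb (63 - fb) c (c + 1) [] hfb).symm
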